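-- pv_equiv track=rewrite | github.com/DewPeaceTigers/AlgorithmStudy | weeks/week_17/PG_60057/yeri.py | solution
-- ===== SOURCE A (Python) =====
-- def solution(data):
--     answer = []
--     if len(data)==1:
--         return 1
--     for i in range(1,(len(data)//2)+1):
--         right = data[:i]
--         num = 1
--         temp = ''
--         for j in range(i,len(data),i):
--             if right == data[j:j+i]: num+=1
--             else:
--                 if num != 1:
--                     temp+= str(num)+right
--                 else:
--                     temp+=right
--                 right = data[j:j+i]
--                 num=1
--         if num != 1:
--             temp += str(num) + right
--         else:
--             temp += right
--         answer.append(len(temp))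
--     return min(answer)
-- ===== SOURCE B (Python) =====
-- def solution(data):
--     n = len(data)
--     if n == 1:
--         return 1
--     lengths = []
--     for i in range(1, n // 2 + 1):
--         q, r = divmod(n, i)
--         # positions (in full-chunk units) where adjacent full chunks differ
--         cuts = [0] + [j for j in range(1, q)
--                       if data[(j - 1) * i:j * i] != data[j * i:(j + 1) * i]] + [q]
--         # closed form: each of the (len(cuts)-1) runs costs i chars for its block,
--         # the leftover tail (n % i chars) is always its own unrepeated run
--         total = (len(cuts) - 1) * i + r
--         for a, b in zip(cuts, cuts[1:]):
--             if b - a > 1: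
--                 total += len(str(b - a))
--         lengths.append(total)
--     return min(lengths)
-- ===== Notes on version B (the rewrite author's own statement) =====
-- stated objective: faster
-- what changed: B replaces A's sequential run-length state machine that physically concatenates each compressed string with a boundary/arithmetic method: per block size it computes the list of positions where adjacent full blocks differ, gets the base cost in closed form ((#runs)*i + n%i, the leftover tail being its own run), and adds digit counts over the gaps between boundaries; no compressed string is ever built.
import Mathlib
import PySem

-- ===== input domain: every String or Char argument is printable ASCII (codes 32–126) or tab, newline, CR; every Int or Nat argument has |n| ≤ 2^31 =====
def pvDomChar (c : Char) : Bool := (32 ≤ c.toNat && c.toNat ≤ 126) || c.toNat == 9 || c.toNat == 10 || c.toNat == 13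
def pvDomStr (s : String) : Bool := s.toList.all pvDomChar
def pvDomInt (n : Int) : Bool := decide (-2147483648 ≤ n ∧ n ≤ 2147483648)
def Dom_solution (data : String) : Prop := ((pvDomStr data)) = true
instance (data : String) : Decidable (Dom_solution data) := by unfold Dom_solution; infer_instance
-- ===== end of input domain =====

-- B replaces A's sequential run-length state machine (which concatenates each compressed string)
-- with boundary positions between differing adjacent full blocks plus gap arithmetic; proved equal
-- on every non-empty string (A raises ValueError on "").


-- ===== PORT A =====
-- Python strings handled as their code-point lists; str(num) = PySem.Int.toChars, slices = PySem.List.slice.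
def solution (data : String) : Int :=
  if PySem.List.len data.toList = 1 then 1
  else
    let answer : List Int :=
      (PySem.List.pyRange 1 (PySem.Int.floordiv (PySem.List.len data.toList) 2 + 1) 1).foldl
        (fun answer i =>
          answer ++
            [(let st :=
                (PySem.List.pyRange i (PySem.List.len data.toList) i).foldl
                  (fun (st : List Char × Int × List Char) j =>
                    let right := st.1; let num := st.2.1; let temp := st.2.2
                    if right == PySem.List.slice data.toList (some j) (some (j + i)) then
                      (right, num + 1, temp)
                    else
                      (PySem.List.slice data.toList (some j) (some (j + i)), 1,
                        if num ≠ 1 then temp ++ (PySem.Int.toChars num ++ right) else temp ++ right))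
                  (PySem.List.slice data.toList none (some i), 1, ([] : List Char))
              let right := st.1; let num := st.2.1; let temp := st.2.2
              let temp := if num ≠ 1 then temp ++ (PySem.Int.toChars num ++ right) else temp ++ right
              (temp.length : Int))])
        []
    -- min([]) raises ValueError in Python: Pre_solution excludes data = "" (the only input reaching it)
    (PySem.List.min? answer (fun x => x)).getD 0

-- ===== PORT B =====
-- boundary positions between differing adjacent full blocks, closed-form base cost, digit counts over gaps
def solution_alt (data : String) : Int :=
  let n := PySem.List.len data.toList
  if n = 1 then 1
  else
    let lengths : List Int :=
      (PySem.List.pyRange 1 (PySem.Int.floordiv n 2 + 1) 1).foldl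
        (fun lengths i =>
          let q := PySem.Int.floordiv n i
          let r := PySem.Int.mod n i
          let cuts : List Int :=
            [0] ++
              ((PySem.List.pyRange 1 q 1).filter
                (fun j =>
                  !(PySem.List.slice data.toList (some ((j - 1) * i)) (some (j * i)) ==
                    PySem.List.slice data.toList (some (j * i)) (some ((j + 1) * i))))) ++ [q]
          let total : Int := (PySem.List.len cuts - 1) * i + r
          let total :=
            (cuts.zip cuts.tail).foldl
              (fun total ab =>
                if ab.2 - ab.1 > 1 then total + ((PySem.Int.toChars (ab.2 - ab.1)).length : Int)
                else total)
              total
          lengths ++ [total])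
        []
    (PySem.List.min? lengths (fun x => x)).getD 0

-- ===== PRECONDITION & SPEC =====
-- Pre_ excludes only the empty string, on which the Python A (and B) raise ValueError from min([]).
def Pre_solution (data : String) : Prop := data ≠ ""
instance (data : String) : Decidable (Pre_solution data) := by unfold Pre_solution; infer_instance
def pvWitness_solution : String := "aabbaccc"

def Spec_solution (data : String) (out : Int) : Prop := out = solution_alt data
instance (data : String) (out : Int) : Decidable (Spec_solution data out) := by unfold Spec_solution; infer_instance

-- ===== CLAIM (what is proved, stated in full; the proofs are below) =====
def Claim_equal_solution : Prop := ∀ (data : String), Dom_solution data → Pre_solution data → Spec_solution data (solution data)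

-- ===== LEMMAS AND PROOFS =====

-- the chunk list [data[j:j+i] for j in range(0, n, i)], shared reference point of both reductions
def pvChunks (s : List Char) (i : Int) : List (List Char) :=
  (PySem.List.pyRange 0 (PySem.List.len s) i).map
    (fun j => PySem.List.slice s (some j) (some (j + i)))

-- digit cost of a run count
def pvDigC (k : Int) : Int := if 1 < k then ((PySem.Int.toChars k).length : Int) else 0

-- reference compressed length of a chunk list, one maximal run at a time
def pvEncode : List (List Char) → Int
  | [] => 0
  | c :: rest =>
      let lead := (rest.takeWhile (fun x => x == c)).length
      let k : Int := (lead : Int) + 1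
      (c.length : Int) + (if 1 < k then ((PySem.Int.toChars k).length : Int) else 0) +
        pvEncode (rest.drop lead)
termination_by cs => cs.length
decreasing_by simp only [List.length_cons, List.length_drop]; omega

-- ---- A-side reduction: A's inner loop = pvEncode of the chunk list ----

def pvStepA (st : List Char × Int × List Char) (c : List Char) : List Char × Int × List Char :=
  if st.1 == c then (st.1, st.2.1 + 1, st.2.2)
  else (c, 1, if st.2.1 ≠ 1 then st.2.2 ++ (PySem.Int.toChars st.2.1 ++ st.1) else st.2.2 ++ st.1)

def pvOutLen (st : List Char × Int × List Char) : Int :=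
  ((if st.2.1 ≠ 1 then st.2.2 ++ (PySem.Int.toChars st.2.1 ++ st.1) else st.2.2 ++ st.1).length : Int)

def pvG (num : Int) (right : List Char) : List (List Char) → Int
  | [] => ((if num ≠ 1 then PySem.Int.toChars num ++ right else right).length : Int)
  | c :: cs =>
      if right == c then pvG (num + 1) right cs
      else ((if num ≠ 1 then PySem.Int.toChars num ++ right else right).length : Int) + pvG 1 c cs

theorem pvFold_eq_pvG (cs : List (List Char)) :
    ∀ (right : List Char) (num : Int) (temp : List Char),
    pvOutLen (cs.foldl pvStepA (right, num, temp)) = (temp.length : Int) + pvG num right cs := by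
  induction cs with
  | nil =>
      intro right num temp
      simp only [List.foldl_nil, pvOutLen, pvG]
      split_ifs <;> push_cast [List.length_append] <;> ring
  | cons c cs ih =>
      intro right num temp
      by_cases h : right == c
      · simp [pvStepA, h, pvG, ih]
      · simp only [List.foldl_cons, pvStepA, h, if_neg, Bool.false_eq_true, not_false_iff]
        rw [ih]
        simp [pvG, h]
        split_ifs <;> push_cast [List.length_append] <;> ring

theorem pvBeqComm (a b : List Char) : (a == b) = (b == a) := by
  by_cases h : a = b
  · simp [h]
  · rw [beq_eq_false_iff_ne.mpr h, beq_eq_false_iff_ne.mpr (Ne.symm h)]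

theorem pvG_eq_encode (cs : List (List Char)) :
    ∀ (right : List Char) (num : Int), 1 ≤ num →
    pvG num right cs =
      (right.length : Int) +
      (if 1 < num + ((cs.takeWhile (fun x => x == right)).length : Int)
        then ((PySem.Int.toChars (num + ((cs.takeWhile (fun x => x == right)).length : Int))).length : Int)
        else 0) +
      pvEncode (cs.drop (cs.takeWhile (fun x => x == right)).length) := by
  induction cs with
  | nil =>
      intro right num h
      simp only [pvG, List.takeWhile_nil, List.length_nil, List.drop_nil, pvEncode,
        Nat.cast_zero, add_zero]
      split_ifs with h1 h2 h2
      · push_cast [List.length_append]; ring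
      · omega
      · omega
      · rfl
  | cons c cs ih =>
      intro right num h
      by_cases hrc : right == c
      · have hcr : (c == right) = true := by rw [pvBeqComm]; exact hrc
        simp only [pvG, hrc, if_pos, List.takeWhile_cons, hcr, List.length_cons]
        rw [ih right (num + 1) (by omega)]
        have : num + 1 + ((cs.takeWhile (fun x => x == right)).length : Int)
            = num + (((cs.takeWhile (fun x => x == right)).length : Nat) + 1 : Nat) := by
          push_cast; ring
        simp [List.drop_succ_cons, this]
      · have hcr : (c == right) = false := by
          rw [pvBeqComm]; exact Bool.eq_false_iff.mpr hrc
        simp only [pvG, hrc, Bool.false_eq_true, if_false, List.takeWhile_cons, hcr,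
          List.length_nil, Nat.cast_zero, add_zero, List.drop_zero]
        rw [ih c 1 (by omega)]
        have henc : pvEncode (c :: cs) =
            (c.length : Int) +
            (if 1 < 1 + ((cs.takeWhile (fun x => x == c)).length : Int)
              then ((PySem.Int.toChars (1 + ((cs.takeWhile (fun x => x == c)).length : Int))).length : Int)
              else 0) +
            pvEncode (cs.drop (cs.takeWhile (fun x => x == c)).length) := by
          rw [pvEncode]
          simp [add_comm]
        rw [← henc]
        split_ifs with h1 h2 h2
        · push_cast [List.length_append]; ring
        · omega
        · omega
        · ring

-- splitting off the first element of a positive-step range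
theorem pvRange_pos_cons (a b s : Int) (hs : 0 < s) (hab : a < b) :
    PySem.List.pyRange a b s = a :: PySem.List.pyRange (a + s) b s := by
  rw [PySem.List.pyRange_of_pos a b hs, PySem.List.pyRange_of_pos (a + s) b hs]
  have hcount : (if a < b then ((b - a + s - 1) / s).toNat else 0)
      = (if a + s < b then ((b - (a + s) + s - 1) / s).toNat else 0) + 1 := by
    rw [if_pos hab]
    by_cases h2 : a + s < b
    · rw [if_pos h2]
      have : b - a + s - 1 = (b - (a + s) + s - 1) + 1 * s := by ring
      rw [this, Int.add_mul_ediv_right _ _ (by omega : s ≠ 0)]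
      have hpos : 0 ≤ (b - (a + s) + s - 1) / s :=
        Int.ediv_nonneg (by omega) (by omega)
      omega
    · rw [if_neg h2]
      have h3 : (b - a + s - 1) / s = 1 := by
        have hr : b - a + s - 1 = (b - a - 1) + 1 * s := by ring
        have h0 : (b - a - 1) / s = 0 := Int.ediv_eq_zero_of_lt (by omega) (by omega)
        rw [hr, Int.add_mul_ediv_right _ _ (by omega : s ≠ 0), h0]
        omega
      rw [h3]
      rfl
  rw [hcount, List.range_succ_eq_map]
  simp only [List.map_cons, List.map_map, Nat.cast_zero, mul_zero, add_zero]
  refine congrArg₂ _ rfl ?_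
  apply List.map_congr_left
  intro k _
  simp only [Function.comp_apply, Nat.succ_eq_add_one]
  push_cast
  ring

theorem pvFoldAppend {α β : Type} (f : α → β) (l : List α) (acc : List β) :
    l.foldl (fun acc x => acc ++ [f x]) acc = acc ++ l.map f := by
  induction l generalizing acc with
  | nil => simp
  | cons x l ih => simp [ih]

theorem pvG_one (right : List Char) (cs : List (List Char)) :
    pvG 1 right cs = pvEncode (right :: cs) := by
  rw [pvG_eq_encode cs right 1 le_rfl, pvEncode]
  simp [add_comm]

theorem pvChunks_cons (s : List Char) (i : Int) (hi : 0 < i) (hn : 0 < s.length) :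
    pvChunks s i =
      PySem.List.slice s none (some i) ::
        (PySem.List.pyRange i (PySem.List.len s) i).map
          (fun j => PySem.List.slice s (some j) (some (j + i))) := by
  unfold pvChunks
  rw [PySem.List.len_eq, pvRange_pos_cons 0 (s.length : Int) i hi (by exact_mod_cast hn)]
  simp

theorem pvAInner_eq (s : List Char) (i : Int) (hi : 1 ≤ i) (hn : 0 < s.length) :
    (let st :=
        (PySem.List.pyRange i (PySem.List.len s) i).foldl
          (fun (st : List Char × Int × List Char) j =>
            let right := st.1; let num := st.2.1; let temp := st.2.2
            if right == PySem.List.slice s (some j) (some (j + i)) then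
              (right, num + 1, temp)
            else
              (PySem.List.slice s (some j) (some (j + i)), 1,
                if num ≠ 1 then temp ++ (PySem.Int.toChars num ++ right) else temp ++ right))
          (PySem.List.slice s none (some i), 1, ([] : List Char))
      let right := st.1; let num := st.2.1; let temp := st.2.2
      let temp := if num ≠ 1 then temp ++ (PySem.Int.toChars num ++ right) else temp ++ right
      ((temp.length : Int)))
    = pvEncode (pvChunks s i) := by
  show pvOutLen
      ((PySem.List.pyRange i (PySem.List.len s) i).foldl
        (fun st j => pvStepA st (PySem.List.slice s (some j) (some (j + i))))
        (PySem.List.slice s none (some i), 1, ([] : List Char)))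
    = pvEncode (pvChunks s i)
  rw [← List.foldl_map (f := fun j => PySem.List.slice s (some j) (some (j + i))) (g := pvStepA)]
  rw [pvFold_eq_pvG, pvG_one, ← pvChunks_cons s i (by omega) hn]
  simp

-- ---- B-side machinery: boundaries, gap score, and their relation to pvEncode ----

-- digit score of a cut list against a previous cut
def pvScore : Int → List Int → Int
  | _, [] => 0
  | prev, c :: cs => pvDigC (c - prev) + pvScore c cs

-- 0-based positions j with chunk j ≠ chunk (j+1)
def pvBrk (fs : List (List Char)) : List Nat :=
  (List.range (fs.length - 1)).filter (fun j => !(fs.getD j [] == fs.getD (j + 1) []))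

theorem pvZipFold (rest : List Int) : ∀ (c0 t0 : Int),
    ((c0 :: rest).zip rest).foldl
      (fun total ab =>
        if ab.2 - ab.1 > 1 then total + ((PySem.Int.toChars (ab.2 - ab.1)).length : Int)
        else total) t0
    = t0 + pvScore c0 rest := by
  induction rest with
  | nil => intro c0 t0; simp [pvScore]
  | cons c cs ih =>
      intro c0 t0
      simp only [List.zip_cons_cons, List.foldl_cons]
      rw [ih]
      simp only [pvScore, pvDigC, gt_iff_lt]
      split_ifs <;> ring

theorem pvScore_shift (k : Int) : ∀ (l : List Int) (prev : Int),
    pvScore (prev + k) (l.map (fun x => x + k)) = pvScore prev l := by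
  intro l
  induction l with
  | nil => intro prev; simp [pvScore]
  | cons c cs ih =>
      intro prev
      simp only [List.map_cons, pvScore]
      rw [show c + k - (prev + k) = c - prev by ring, ih]

theorem pvScore_shift0 (k : Int) (l : List Int) :
    pvScore k (l.map (fun x => x + k)) = pvScore 0 l := by
  have := pvScore_shift k l 0
  rwa [zero_add] at this

theorem pvDropWhileHead {α : Type} (p : α → Bool) :
    ∀ (l : List α) (x : α) (t : List α), l.dropWhile p = x :: t → p x = false := by
  intro l
  induction l with
  | nil => intro x t h; simp [List.dropWhile] at h
  | cons a l ih =>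
      intro x t h
      by_cases ha : p a
      · rw [List.dropWhile_cons_of_pos ha] at h; exact ih x t h
      · rw [List.dropWhile_cons_of_neg ha] at h
        obtain ⟨h1, _⟩ := List.cons.inj h
        rw [← h1]; exact Bool.eq_false_iff.mpr ha

theorem pvGetD_rep_app (k : Nat) (c : List Char) (l : List (List Char)) (j : Nat) :
    (List.replicate k c ++ l).getD j [] = if j < k then c else l.getD (j - k) [] := by
  by_cases h : j < k
  · rw [if_pos h, List.getD_append _ _ _ _ (by simp [h]),
      List.getD_eq_getElem?_getD, List.getElem?_replicate, if_pos h]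
    rfl
  · rw [if_neg h, List.getD_append_right _ _ _ _ (by simp; omega), List.length_replicate]

theorem pvBrk_replicate (k : Nat) (c : List Char) : pvBrk (List.replicate k c) = [] := by
  unfold pvBrk
  rw [List.filter_eq_nil_iff.mpr]
  intro j hj
  rw [List.mem_range, List.length_replicate] at hj
  have hj1 : j < k := by omega
  have hj2 : j + 1 < k := by omega
  simp [List.getD_eq_getElem?_getD, List.getElem?_replicate, hj1, hj2]

theorem pvBrk_run (k : Nat) (hk : 1 ≤ k) (c x : List Char) (t : List (List Char))
    (hx : (x == c) = false) :
    pvBrk (List.replicate k c ++ x :: t) = (k - 1) :: (pvBrk (x :: t)).map (fun j => k + j) := by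
  unfold pvBrk
  have hlen : (List.replicate k c ++ x :: t).length - 1 = (k - 1) + (1 + t.length) := by
    simp [List.length_replicate]; omega
  rw [hlen, List.range_eq_range', ← List.range'_append (s := 0) (m := k - 1) (n := 1 + t.length) (step := 1)]
  rw [show (0 + 1 * (k - 1)) = k - 1 by omega,
    ← List.range'_append (s := k - 1) (m := 1) (n := t.length) (step := 1),
    show ((k - 1) + 1 * 1) = k by omega]
  rw [List.filter_append, List.filter_append]
  have h1 : (List.range' 0 (k - 1)).filter
      (fun j => !((List.replicate k c ++ x :: t).getD j [] == (List.replicate k c ++ x :: t).getD (j + 1) [])) = [] := by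
    rw [List.filter_eq_nil_iff.mpr]
    intro j hj
    rw [List.mem_range'_1] at hj
    rw [pvGetD_rep_app, pvGetD_rep_app, if_pos (by omega), if_pos (by omega)]
    simp
  have h2 : (List.range' (k - 1) 1).filter
      (fun j => !((List.replicate k c ++ x :: t).getD j [] == (List.replicate k c ++ x :: t).getD (j + 1) [])) = [k - 1] := by
    have hcx : (c == x) = false := by rw [pvBeqComm]; exact hx
    have e1 : (List.replicate k c ++ x :: t).getD (k - 1) [] = c := by
      rw [pvGetD_rep_app, if_pos (by omega)]
    have e2 : (List.replicate k c ++ x :: t).getD (k - 1 + 1) [] = x := by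
      rw [pvGetD_rep_app, if_neg (by omega), show k - 1 + 1 - k = 0 by omega]
      rfl
    simp only [List.range'_one, List.filter_cons, List.filter_nil, e1, e2, hcx]
    simp
  have h3 : (List.range' k t.length).filter
      (fun j => !((List.replicate k c ++ x :: t).getD j [] == (List.replicate k c ++ x :: t).getD (j + 1) [])) =
      ((List.range (t.length)).filter (fun j => !((x :: t).getD j [] == (x :: t).getD (j + 1) []))).map (fun j => k + j) := by
    have hmar : List.map (fun x => k + x) (List.range' 0 t.length) = List.range' k t.length := by
      simpa using List.map_add_range' (a := k) 0 t.length 1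
    rw [← hmar, List.filter_map, List.range_eq_range']
    refine congrArg _ (List.filter_congr ?_)
    intro u _
    simp only [Function.comp_apply]
    have e1 : (List.replicate k c ++ x :: t).getD (k + u) [] = (x :: t).getD u [] := by
      rw [pvGetD_rep_app, if_neg (by omega), show k + u - k = u by omega]
    have e2 : (List.replicate k c ++ x :: t).getD (k + u + 1) [] = (x :: t).getD (u + 1) [] := by
      rw [pvGetD_rep_app, if_neg (by omega), show k + u + 1 - k = u + 1 by omega]
    rw [e1, e2]
  rw [h1, h2, h3]
  simp [List.length_cons, Nat.add_sub_cancel]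

-- the central identity: run-length cost = boundary-count closed form + gap digit score
theorem pvMain (iN : Nat) : ∀ (fs : List (List Char)), fs ≠ [] → (∀ c ∈ fs, c.length = iN) →
    pvEncode fs = (((pvBrk fs).length : Int) + 1) * (iN : Int) +
      pvScore 0 ((pvBrk fs).map (fun (j : Nat) => 1 + (j : Int)) ++ [(fs.length : Int)]) := by
  intro fs
  induction fs using pvEncode.induct with
  | case1 => intro h; exact absurd rfl h
  | case2 c rest lead ih =>
      intro _ hlen
      have hlead : lead = (rest.takeWhile (fun x => x == c)).length := rfl
      have hw : rest.takeWhile (fun x => x == c) = List.replicate lead c := by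
        rw [hlead]
        exact List.eq_replicate_of_mem (fun b hb => eq_of_beq (List.mem_takeWhile_imp (p := fun x => x == c) hb))
      have htake : rest.take lead = List.replicate lead c := by
        rw [← hw, ← (List.prefix_iff_eq_take.mp (List.takeWhile_prefix _)), hw]
      have hfs : c :: rest = List.replicate (lead + 1) c ++ rest.drop lead := by
        conv_lhs => rw [← List.take_append_drop lead rest]
        rw [htake, ← List.cons_append, ← List.replicate_succ]
      have hdw : rest.drop lead = rest.dropWhile (fun x => x == c) := by
        have hsplit := List.takeWhile_append_dropWhile (p := fun x => x == c) (l := rest)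
        have h5 : rest.takeWhile (fun x => x == c) ++ rest.drop lead = rest := by
          conv_rhs => rw [← List.take_append_drop lead rest]
          rw [htake, hw]
        exact List.append_cancel_left (h5.trans hsplit.symm)
      rw [pvEncode]
      rcases hrest' : rest.drop lead with _ | ⟨x, t⟩
      · -- tail is empty: a single run
        have hc : c.length = iN := hlen c (by simp)
        rw [hfs, hrest', List.append_nil, pvBrk_replicate]
        simp only [List.length_nil, List.map_nil, List.nil_append, List.length_replicate,
          pvScore, pvDigC, Nat.cast_zero, zero_add, one_mul, pvEncode, sub_zero, add_zero, hc]
        push_cast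
        split_ifs <;> first | ring | omega
      · -- tail is nonempty: first boundary at lead, recurse
        have hx : (x == c) = false := by
          apply pvDropWhileHead (fun x => x == c) rest
          rw [← hdw, hrest']
        rw [hfs, hrest', pvBrk_run (lead + 1) (by omega) c x t hx]
        have hih := ih (by rw [hrest']; simp) (by
          intro d hd
          exact hlen d (by rw [hfs]; exact List.mem_append_right _ (hrest' ▸ hd)))
        rw [hrest'] at hih
        have hc : c.length = iN := hlen c (by rw [hfs, hrest']; simp)
        -- rewrite the score list into shifted form
        have hmap : ((lead + 1 - 1) :: (pvBrk (x :: t)).map (fun j => lead + 1 + j)).map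
              (fun (j : Nat) => 1 + (j : Int)) ++ [((List.replicate (lead + 1) c ++ x :: t).length : Int)]
            = ((lead : Int) + 1) ::
              (((pvBrk (x :: t)).map (fun (j : Nat) => 1 + (j : Int)) ++ [((x :: t).length : Int)]).map
                (fun y => y + ((lead : Int) + 1))) := by
          simp only [List.map_cons, List.map_map, List.map_append, List.map_nil,
            List.cons_append, List.nil_append, Nat.add_sub_cancel, List.length_append,
            List.length_replicate, List.length_cons, List.cons.injEq]
          refine ⟨by push_cast; ring, ?_⟩
          refine congrArg₂ _ (List.map_congr_left ?_) ?_
          · intro j _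
            simp only [Function.comp_apply]
            push_cast; ring
          · refine congrArg₂ _ ?_ rfl
            push_cast; ring
        rw [hmap]
        simp only [pvScore, sub_zero]
        rw [pvScore_shift0 ((lead : Int) + 1)]
        rw [hih, hc]
        simp only [List.length_cons, List.length_map, Nat.cast_add, Nat.cast_one]
        unfold pvDigC
        ring_nf
        split_ifs <;> ring

-- appending the leftover partial chunk (length ≠ iN) adds exactly its length
theorem pvEncode_append_single (iN : Nat) (tl : List Char) (ht : tl.length ≠ iN) :
    ∀ (fs : List (List Char)), (∀ c ∈ fs, c.length = iN) →
    pvEncode (fs ++ [tl]) = pvEncode fs + (tl.length : Int) := by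
  intro fs
  induction fs using pvEncode.induct with
  | case1 =>
      intro _
      simp [pvEncode, pvDigC]
  | case2 c rest lead ih =>
      intro hlen
      have hc : c.length = iN := hlen c (by simp)
      have htc : (tl == c) = false := by
        apply beq_eq_false_iff_ne.mpr
        intro h; exact ht (h ▸ hc)
      have htw : (rest ++ [tl]).takeWhile (fun x => x == c) = rest.takeWhile (fun x => x == c) := by
        rw [List.takeWhile_append]
        split_ifs with hf
        · rw [(List.takeWhile_prefix _).eq_of_length hf]
          simp [List.takeWhile, htc]
        · rfl
      have hlead_le : lead ≤ rest.length := by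
        exact (List.takeWhile_prefix _).sublist.length_le
      rw [List.cons_append, pvEncode, htw]
      rw [List.drop_append_of_le_length hlead_le]
      rw [ih (fun d hd => hlen d (List.mem_cons_of_mem c (List.mem_of_mem_drop hd)))]
      rw [pvEncode]
      ring

-- ---- chunk-list decomposition into full chunks plus an optional partial chunk ----

theorem pvCeilCount (nN iT : Nat) (hi : 1 ≤ iT) :
    (nN + iT - 1) / iT = nN / iT + (if nN % iT = 0 then 0 else 1) := by
  rcases Nat.eq_zero_or_pos (nN % iT) with h0 | hpos
  · rw [if_pos h0]
    obtain ⟨q, hq⟩ : ∃ q, nN = iT * q := ⟨nN / iT, (Nat.mul_div_cancel' (Nat.dvd_of_mod_eq_zero h0)).symm⟩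
    subst hq
    rw [show iT * q + iT - 1 = iT * q + (iT - 1) by omega, Nat.mul_add_div (by omega),
      Nat.div_eq_of_lt (by omega), Nat.mul_div_cancel_left _ (by omega)]
  · rw [if_neg (by omega)]
    have hq := Nat.div_add_mod nN iT
    set q := nN / iT; set r := nN % iT
    have hr : r < iT := Nat.mod_lt _ (by omega)
    have hm : iT * (q + 1) = iT * q + iT := by ring
    rw [show nN + iT - 1 = iT * (q + 1) + (r - 1) by omega, Nat.mul_add_div (by omega),
      Nat.div_eq_of_lt (by omega)]

theorem pvChunks_decomp (s : List Char) (iT : Nat) (hi : 1 ≤ iT) (hn : 1 ≤ s.length) :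
    pvChunks s (iT : Int) =
      (List.range (s.length / iT)).map (fun j => (s.drop (iT * j)).take iT) ++
        (if s.length % iT = 0 then [] else [(s.drop (iT * (s.length / iT))).take iT]) := by
  unfold pvChunks
  rw [PySem.List.len_eq, PySem.List.pyRange_of_pos 0 (s.length : Int) (by exact_mod_cast hi)]
  rw [if_pos (by exact_mod_cast hn)]
  have hcnt : (((s.length : Int) - 0 + (iT : Int) - 1) / (iT : Int)).toNat
      = s.length / iT + (if s.length % iT = 0 then 0 else 1) := by
    have : (s.length : Int) - 0 + (iT : Int) - 1 = ((s.length + iT - 1 : Nat) : Int) := by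
      push_cast [Nat.cast_sub (by omega : 1 ≤ s.length + iT)]; ring
    rw [this, ← Int.natCast_ediv, Int.toNat_natCast, pvCeilCount s.length iT hi]
  rw [hcnt]
  have hmap : ∀ (m : Nat), ((List.range m).map (fun (k : Nat) => (0 : Int) + (iT : Int) * (k : Int))).map
        (fun j => PySem.List.slice s (some j) (some (j + (iT : Int))))
      = (List.range m).map (fun j => (s.drop (iT * j)).take iT) := by
    intro m
    rw [List.map_map]
    apply List.map_congr_left
    intro k _
    simp only [Function.comp_apply, zero_add]
    rw [show ((iT : Int) * (k : Int)) = ((iT * k : Nat) : Int) by push_cast; ring,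
      show (((iT * k : Nat) : Int) + (iT : Int)) = ((iT * k : Nat) : Int) + ((iT : Nat) : Int) by norm_num]
    exact PySem.List.slice_natCast_add s (iT * k) iT
  rcases Nat.eq_zero_or_pos (s.length % iT) with h0 | hpos
  · rw [if_pos h0, if_pos h0, hmap]
    simp
  · rw [if_neg (by omega), if_neg (by omega)]
    rw [List.range_succ, List.map_append, List.map_append, hmap]
    simp only [List.map_cons, List.map_nil, zero_add]
    rw [show ((iT : Int) * ((s.length / iT : Nat) : Int)) = ((iT * (s.length / iT) : Nat) : Int) by push_cast; ring,
      show (((iT * (s.length / iT) : Nat) : Int) + (iT : Int)) = ((iT * (s.length / iT) : Nat) : Int) + ((iT : Nat) : Int) by norm_num]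
    rw [PySem.List.slice_natCast_add s (iT * (s.length / iT)) iT]

theorem pvChunkLenFull (s : List Char) (iT j : Nat) (hj : j < s.length / iT) :
    ((s.drop (iT * j)).take iT).length = iT := by
  have h1 : iT * (j + 1) ≤ iT * (s.length / iT) := Nat.mul_le_mul_left iT (by omega)
  have h2 : iT * (s.length / iT) ≤ s.length := Nat.mul_div_le s.length iT
  have h3 : iT * (j + 1) = iT * j + iT := by ring
  simp [List.length_take, List.length_drop]
  omega

theorem pvChunkLenPart (s : List Char) (iT : Nat) (hi : 1 ≤ iT) :
    ((s.drop (iT * (s.length / iT))).take iT).length = s.length % iT := by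
  have h2 := Nat.div_add_mod s.length iT
  have hr : s.length % iT < iT := Nat.mod_lt _ (by omega)
  simp [List.length_take, List.length_drop]
  omega

-- ---- B-side reduction: B's inner computation = pvEncode of the chunk list ----

theorem pvGetD_map_range {α : Type} (f : Nat → α) (m k : Nat) (hk : k < m) (d : α) :
    ((List.range m).map f).getD k d = f k := by
  simp [List.getD_eq_getElem?_getD, List.getElem?_map, List.getElem?_range, hk]

theorem pvSliceChunk (s : List Char) (iT : Nat) (a b : Int) (j : Nat)
    (ha : a = ((iT * j : Nat) : Int)) (hb : b = ((iT * (j + 1) : Nat) : Int)) :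
    PySem.List.slice s (some a) (some b) = (s.drop (iT * j)).take iT := by
  subst ha hb
  rw [PySem.List.slice_toNat s (by positivity) (by positivity), Int.toNat_natCast,
    Int.toNat_natCast, show iT * (j + 1) - iT * j = iT from by rw [Nat.mul_succ]; omega]

theorem pvBInner_eq (s : List Char) (i : Int) (hi : 1 ≤ i)
    (hq : 1 ≤ PySem.Int.floordiv (PySem.List.len s) i) :
    (let q := PySem.Int.floordiv (PySem.List.len s) i
     let r := PySem.Int.mod (PySem.List.len s) i
     let cuts : List Int :=
       [0] ++
         ((PySem.List.pyRange 1 q 1).filter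
           (fun j =>
             !(PySem.List.slice s (some ((j - 1) * i)) (some (j * i)) ==
               PySem.List.slice s (some (j * i)) (some ((j + 1) * i))))) ++ [q]
     let total : Int := (PySem.List.len cuts - 1) * i + r
     (cuts.zip cuts.tail).foldl
       (fun total ab =>
         if ab.2 - ab.1 > 1 then total + ((PySem.Int.toChars (ab.2 - ab.1)).length : Int)
         else total)
       total)
    = pvEncode (pvChunks s i) := by
  have hi0 : i = ((i.toNat : Nat) : Int) := (Int.toNat_of_nonneg (by omega)).symm
  set iT := i.toNat with hiTdef
  have hiT : 1 ≤ iT := by omega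
  have hq' : PySem.Int.floordiv (PySem.List.len s) i = ((s.length / iT : Nat) : Int) := by
    rw [PySem.List.len_eq, hi0, PySem.Int.floordiv,
      Int.fdiv_eq_ediv_of_nonneg _ (by positivity)]
    exact (Int.natCast_ediv _ _).symm
  have hr' : PySem.Int.mod (PySem.List.len s) i = ((s.length % iT : Nat) : Int) := by
    rw [PySem.List.len_eq, hi0, PySem.Int.mod,
      Int.fmod_eq_emod_of_nonneg _ (by positivity)]
    exact (Int.natCast_emod _ _).symm
  have hqN : 1 ≤ s.length / iT := by
    rw [hq'] at hq; exact_mod_cast hq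
  have hn1 : 1 ≤ s.length := le_trans hiT ((Nat.one_le_div_iff (by omega)).mp hqN)
  set qN := s.length / iT with hqNdef
  set fsF := (List.range qN).map (fun j => (s.drop (iT * j)).take iT) with hfsF
  have hflen : fsF.length = qN := by rw [hfsF]; simp
  have hfall : ∀ c ∈ fsF, c.length = iT := by
    intro c hc
    rw [hfsF] at hc
    obtain ⟨j, hj, rfl⟩ := List.mem_map.mp hc
    exact pvChunkLenFull s iT j (List.mem_range.mp hj)
  have hfne : fsF ≠ [] := by
    intro h0
    rw [h0] at hflen
    simp at hflen
    omega
  have hfilt : ((PySem.List.pyRange 1 (PySem.Int.floordiv (PySem.List.len s) i) 1).filter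
        (fun j =>
          !(PySem.List.slice s (some ((j - 1) * i)) (some (j * i)) ==
            PySem.List.slice s (some (j * i)) (some ((j + 1) * i)))))
      = (pvBrk fsF).map (fun (j : Nat) => 1 + (j : Int)) := by
    rw [hq', PySem.List.pyRange_one,
      show ((((qN : Nat) : Int)) - 1).toNat = qN - 1 from by omega, List.filter_map]
    unfold pvBrk
    rw [hflen]
    refine congrArg _ (List.filter_congr ?_)
    intro k hk
    have hk' : k < qN - 1 := List.mem_range.mp hk
    simp only [Function.comp_apply]
    rw [pvSliceChunk s iT _ _ k (by rw [hi0]; push_cast; ring) (by rw [hi0]; push_cast; ring),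
      pvSliceChunk s iT _ _ (k + 1) (by rw [hi0]; push_cast; ring) (by rw [hi0]; push_cast; ring),
      hfsF, pvGetD_map_range _ qN k (by omega), pvGetD_map_range _ qN (k + 1) (by omega)]
  show (((0 : Int) :: (((PySem.List.pyRange 1 (PySem.Int.floordiv (PySem.List.len s) i) 1).filter
          (fun j =>
            !(PySem.List.slice s (some ((j - 1) * i)) (some (j * i)) ==
              PySem.List.slice s (some (j * i)) (some ((j + 1) * i))))) ++
          [PySem.Int.floordiv (PySem.List.len s) i])).zip
        ((((PySem.List.pyRange 1 (PySem.Int.floordiv (PySem.List.len s) i) 1).filter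
          (fun j =>
            !(PySem.List.slice s (some ((j - 1) * i)) (some (j * i)) ==
              PySem.List.slice s (some (j * i)) (some ((j + 1) * i))))) ++
          [PySem.Int.floordiv (PySem.List.len s) i]))).foldl
      (fun total ab =>
        if ab.2 - ab.1 > 1 then total + ((PySem.Int.toChars (ab.2 - ab.1)).length : Int)
        else total)
      ((PySem.List.len ((0 : Int) :: (((PySem.List.pyRange 1 (PySem.Int.floordiv (PySem.List.len s) i) 1).filter
          (fun j =>
            !(PySem.List.slice s (some ((j - 1) * i)) (some (j * i)) ==
              PySem.List.slice s (some (j * i)) (some ((j + 1) * i))))) ++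
          [PySem.Int.floordiv (PySem.List.len s) i])) - 1) * i + PySem.Int.mod (PySem.List.len s) i)
    = pvEncode (pvChunks s i)
  rw [pvZipFold, PySem.List.len_eq, hfilt, hq', hr']
  rw [hi0, pvChunks_decomp s iT hiT hn1, ← hqNdef]
  rcases Nat.eq_zero_or_pos (s.length % iT) with h0 | hpos
  · rw [if_pos h0, List.append_nil, ← hfsF, pvMain iT fsF hfne hfall, hflen, h0]
    simp only [List.length_cons, List.length_append, List.length_map, List.length_nil]
    push_cast
    ring
  · rw [if_neg (by omega), ← hfsF,
      pvEncode_append_single iT _ (by rw [pvChunkLenPart s iT hiT]; exact Nat.ne_of_lt (Nat.mod_lt _ (by omega))) fsF hfall,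
      pvMain iT fsF hfne hfall, hflen, pvChunkLenPart s iT hiT]
    simp only [List.length_cons, List.length_append, List.length_map, List.length_nil]
    push_cast
    ring

-- ===== VERDICT (by name: the statement is the Claim_ definition above) =====
theorem solution_spec : Claim_equal_solution := by
  intro data _ hpre
  have hn : 0 < data.toList.length := by
    rcases Nat.eq_zero_or_pos data.toList.length with h0 | h0
    · exact absurd (by simpa using congrArg String.ofList (List.eq_nil_of_length_eq_zero h0)) hpre
    · exact h0
  unfold Spec_solution solution solution_alt
  by_cases h1 : PySem.List.len data.toList = 1
  · rw [if_pos h1, if_pos h1]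
  · rw [if_neg h1, if_neg h1, pvFoldAppend, pvFoldAppend]
    refine congrArg (fun l => (PySem.List.min? l (fun x => x)).getD 0) ?_
    apply List.map_congr_left
    intro i hi
    obtain ⟨hi1, hi2⟩ := PySem.List.mem_pyRange_one.mp hi
    have hq : 1 ≤ PySem.Int.floordiv (PySem.List.len data.toList) i := by
      rw [PySem.List.len_eq, PySem.Int.floordiv, Int.fdiv_eq_ediv_of_nonneg _ (by positivity)]
      rw [PySem.List.len_eq, PySem.Int.floordiv, Int.fdiv_eq_ediv_of_nonneg _ (by positivity)] at hi2
      have h2 : i ≤ (data.toList.length : Int) / 2 := by omega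
      have h3 : i ≤ (data.toList.length : Int) :=
        le_trans h2 (Int.ediv_le_self _ (by positivity))
      exact Int.le_ediv_iff_mul_le (by omega) |>.mpr (by omega)
    rw [pvAInner_eq data.toList i hi1 hn]
    exact (pvBInner_eq data.toList i hi1 hq).symm
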